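-- pv_equiv track=rewrite | github.com/rising-entropy/Assignment-Archives | DAA/Assignment 1/Q8.py | getRankOfNumber
-- ===== SOURCE A (Python) =====
-- def getRankOfNumber(stream, num):
--   stream.sort()
--   dic = {}
--   for s in stream:
--     if s in dic.keys():
--       dic[s] += 1
--     else:
--       dic[s] = 1
--   for i in range(len(stream)):
--     if stream[i] == num:
--       return i+(dic[num]-1)
--     if stream[i] > num:
--       return i
--   if num > stream[len(stream)-1]:
--     return len(stream)
--   return 0
-- ===== SOURCE B (Python) =====
-- def getRankOfNumber(stream, num):
--     # Single pass: count elements smaller than num and equal to num; no sort.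
--     less = 0
--     eq = 0
--     for x in stream:
--         if x < num:
--             less += 1
--         elif x == num:
--             eq += 1
--     return less + eq - 1 if eq != 0 else less
-- ===== Notes on version B (the rewrite author's own statement) =====
-- stated objective: faster
-- what changed: Replaced sort + dict-building + indexed scan with a single pass keeping two counters (elements < num and == num); rank = less+eq-1 if num occurs, else less.
import Mathlib
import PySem

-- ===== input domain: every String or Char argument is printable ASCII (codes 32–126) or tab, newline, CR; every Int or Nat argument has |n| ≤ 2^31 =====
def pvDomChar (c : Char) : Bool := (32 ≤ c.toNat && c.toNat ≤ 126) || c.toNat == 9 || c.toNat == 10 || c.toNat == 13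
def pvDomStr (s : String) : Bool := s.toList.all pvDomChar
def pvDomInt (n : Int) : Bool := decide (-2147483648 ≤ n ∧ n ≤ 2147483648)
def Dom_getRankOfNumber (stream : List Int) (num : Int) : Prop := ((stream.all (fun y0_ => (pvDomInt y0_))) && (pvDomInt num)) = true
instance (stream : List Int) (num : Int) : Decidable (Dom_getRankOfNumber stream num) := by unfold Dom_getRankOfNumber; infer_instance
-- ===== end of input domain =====

-- B replaces A's sort + dict + indexed scan by one pass with two counters (faster, O(n) vs O(n log n)).
-- NOTE: A sorts its argument in place; the equivalence proved here is about the RETURN value only.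

-- ===== PORT A =====
-- the second for-loop of A: returns some r at the two early returns, none if it falls through
def pvALoop (num cnt : Int) : List Int → Int → Option Int
  | [], _ => none
  | x :: t, i =>
    if x = num then some (i + (cnt - 1))
    else if x > num then some i
    else pvALoop num cnt t (i + 1)

def getRankOfNumber (stream : List Int) (num : Int) : Int :=
  let st := PySem.List.sorted stream (fun x => x) false
  let dic := st.foldl
    (fun d s => if PySem.Dict.contains d s
                then PySem.Dict.insert d s (PySem.Dict.getD d s 0 + 1)
                else PySem.Dict.insert d s 1)
    (PySem.Dict.empty : PySem.Dict Int Int)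
  match pvALoop num (PySem.Dict.getD dic num 0) st 0 with
  | some r => r
  | none =>
    -- stream[len(stream)-1]; on the empty list Python raises IndexError (excluded by Pre_)
    if num > (PySem.List.pyGet? st ((st.length : Int) - 1)).getD 0 then (st.length : Int) else 0

-- ===== PORT B =====
def getRankOfNumber_alt (stream : List Int) (num : Int) : Int :=
  let p := stream.foldl
    (fun (ac : Int × Int) x =>
      if x < num then (ac.1 + 1, ac.2)
      else if x = num then (ac.1, ac.2 + 1)
      else ac)
    (0, 0)
  if p.2 ≠ 0 then p.1 + p.2 - 1 else p.1

-- ===== PRECONDITION & SPEC =====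
-- Pre_ excludes only the empty stream, on which A raises IndexError at stream[len(stream)-1].
def Pre_getRankOfNumber (stream : List Int) (num : Int) : Prop := stream ≠ []
instance (stream : List Int) (num : Int) : Decidable (Pre_getRankOfNumber stream num) := by
  unfold Pre_getRankOfNumber; infer_instance
def pvWitness_getRankOfNumber : List Int × Int := ([3, 1, 2, 2], 2)

def Spec_getRankOfNumber (stream : List Int) (num : Int) (out : Int) : Prop := out = getRankOfNumber_alt stream num
instance (stream : List Int) (num : Int) (out : Int) : Decidable (Spec_getRankOfNumber stream num out) := by unfold Spec_getRankOfNumber; infer_instance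

-- ===== CLAIM (what is proved, stated in full; the proofs are below) =====
def Claim_equal_getRankOfNumber : Prop := ∀ (stream : List Int) (num : Int), Dom_getRankOfNumber stream num → Pre_getRankOfNumber stream num → Spec_getRankOfNumber stream num (getRankOfNumber stream num)

-- ===== LEMMAS AND PROOFS =====

-- B's fold accumulates (count of < num, count of = num) on top of any start accumulator
lemma pvB_fold (num : Int) : ∀ (l : List Int) (a b : Int),
    l.foldl (fun (ac : Int × Int) x =>
      if x < num then (ac.1 + 1, ac.2) else if x = num then (ac.1, ac.2 + 1) else ac) (a, b)
    = (a + (l.countP (fun x => x < num) : Int), b + (l.count num : Int)) := by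
  intro l
  induction l with
  | nil => intro a b; simp
  | cons x t ih =>
    intro a b
    by_cases hlt : x < num
    · have hne : x ≠ num := by omega
      simp only [List.foldl_cons, if_pos hlt, ih, List.countP_cons, List.count_cons]
      simp [hne]
      omega
    · by_cases heq : x = num
      · simp only [List.foldl_cons, if_neg hlt, if_pos heq, ih, List.countP_cons, List.count_cons]
        subst heq
        simp [hlt]
        omega
      · simp only [List.foldl_cons, if_neg hlt, if_neg heq, ih, List.countP_cons, List.count_cons]
        have h1 : ¬ (num == x) = true := by simp; omega
        simp [hlt, h1, heq]

-- A's dict-building loop is a counter: getD num 0 = count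
lemma pvDic_count : ∀ (l : List Int) (d : PySem.Dict Int Int) (v : Int),
    (l.foldl
      (fun d s => if PySem.Dict.contains d s
                  then PySem.Dict.insert d s (PySem.Dict.getD d s 0 + 1)
                  else PySem.Dict.insert d s 1) d).getD v 0
    = d.getD v 0 + (l.count v : Int) := by
  intro l
  induction l with
  | nil => intro d v; simp
  | cons x t ih =>
    intro d v
    rw [List.foldl_cons]
    by_cases hc : PySem.Dict.contains d x = true
    · rw [if_pos hc, ih, PySem.Dict.getD_insert, List.count_cons]
      by_cases h : v = x
      · subst h; simp; omega
      · have h1 : ¬ (v == x) = true := by simpa using h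
        have h2 : ¬ x = v := fun hh => h hh.symm
        simp [h, h1, h2]
    · rw [if_neg hc]
      have hcf : d.contains x = false := by simpa using hc
      have h0 : d.getD x 0 = 0 := PySem.Dict.getD_of_not_contains _ _ hcf
      rw [ih, PySem.Dict.getD_insert, List.count_cons]
      by_cases h : v = x
      · subst h; simp [h0]; omega
      · have h1 : ¬ (v == x) = true := by simpa using h
        have h2 : ¬ x = v := fun hh => h hh.symm
        simp [h, h1, h2]

-- the scan over the sorted list, characterised by the two counters
lemma pvALoop_spec (num cnt : Int) : ∀ (l : List Int), l.Pairwise (· ≤ ·) → ∀ (i : Int),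
    pvALoop num cnt l i =
      if l.count num ≠ 0 then some (i + (l.countP (fun x => x < num) : Int) + (cnt - 1))
      else if l.countP (fun x => num < x) ≠ 0 then some (i + (l.countP (fun x => x < num) : Int))
      else none := by
  intro l
  induction l with
  | nil => intro _ i; simp [pvALoop]
  | cons x t ih =>
    intro hp i
    have hpt : t.Pairwise (· ≤ ·) := hp.of_cons
    have hall : ∀ y ∈ t, x ≤ y := fun y hy => (List.pairwise_cons.mp hp).1 y hy
    by_cases heq : x = num
    · subst heq
      have hlt0 : (x :: t).countP (fun y => y < x) = 0 := by
        apply List.countP_eq_zero.mpr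
        intro y hy
        rcases hy with _ | hy
        · simp
        · simpa using not_lt.mpr (hall y (by assumption))
      have hcnt : (x :: t).count x ≠ 0 := by simp [List.count_cons]
      simp [pvALoop, hcnt, hlt0]
    · by_cases hgt : x > num
      · have hc0 : (x :: t).count num = 0 := by
          apply List.count_eq_zero.mpr
          intro hmem
          rcases List.mem_cons.mp hmem with h | h
          · exact heq h.symm
          · exact absurd (hall num h) (by omega)
        have hlt0 : (x :: t).countP (fun y => y < num) = 0 := by
          apply List.countP_eq_zero.mpr
          intro y hy
          rcases List.mem_cons.mp hy with h | h
          · subst h; simpa using not_lt.mpr (le_of_lt hgt)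
          · have := hall y h; simpa using not_lt.mpr (by omega)
        have hg : (x :: t).countP (fun y => num < y) ≠ 0 := by
          simp [List.countP_cons, hgt]
        simp [pvALoop, heq, hgt, hc0, hlt0, hg]
      · -- x < num
        have hx : x < num := by omega
        have step : pvALoop num cnt (x :: t) i = pvALoop num cnt t (i + 1) := by
          simp [pvALoop, heq, hgt]
        rw [step, ih hpt (i + 1)]
        have hnx : (num == x) = false := by simp; omega
        have hcc : (x :: t).count num = t.count num := by
          simp [List.count_cons, hnx, heq]
        have hlc : (x :: t).countP (fun y => y < num) = t.countP (fun y => y < num) + 1 := by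
          simp [List.countP_cons, hx]
        have hgc : (x :: t).countP (fun y => num < y) = t.countP (fun y => num < y) := by
          simp [List.countP_cons, not_lt.mpr (le_of_lt hx)]
        rw [hcc, hlc, hgc]
        split_ifs with h1 h2
        · congr 1; push_cast; ring
        · congr 1; push_cast; ring
        · rfl

theorem pv_main : ∀ (stream : List Int) (num : Int), stream ≠ [] →
    getRankOfNumber stream num = getRankOfNumber_alt stream num := by
  intro stream num hne
  have hperm : (PySem.List.sorted stream (fun x => x) false).Perm stream :=
    PySem.List.sorted_perm stream (fun x => x) false
  have hsort : (PySem.List.sorted stream (fun x => x) false).Pairwise (· ≤ ·) := by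
    simpa using PySem.List.sorted_pairwise stream (fun x => x)
  simp only [getRankOfNumber, getRankOfNumber_alt]
  rw [pvB_fold, pvDic_count, pvALoop_spec num _ _ hsort 0]
  simp only [PySem.Dict.getD_empty, zero_add]
  set L := PySem.List.sorted stream (fun x => x) false with hL
  have hstne : L ≠ [] := fun h => hne ((PySem.List.sorted_eq_nil_iff stream (fun x => x) false).mp (hL ▸ h))
  have hcount : List.count num L = List.count num stream := hperm.count_eq num
  have hcountl : List.countP (fun x => decide (x < num)) L = List.countP (fun x => decide (x < num)) stream :=
    hperm.countP_eq _
  by_cases hc : List.count num L ≠ 0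
  · rw [if_pos hc]
    have hb : ((List.count num stream : Int)) ≠ 0 := by
      rw [← hcount]; exact_mod_cast hc
    rw [if_pos hb]
    show (((List.countP (fun x => decide (x < num)) L : Int)) + ((List.count num L : Int) - 1)) = _
    rw [hcountl, hcount]
    push_cast
    ring
  · push_neg at hc
    rw [if_neg (by simpa using hc)]
    have hc' : List.count num stream = 0 := by rwa [hcount] at hc
    have hb : ¬ ((List.count num stream : Int)) ≠ 0 := by simp [hc']
    rw [if_neg hb]
    by_cases hg : List.countP (fun x => decide (num < x)) L ≠ 0
    · rw [if_pos hg]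
      show ((List.countP (fun x => decide (x < num)) L : Int)) = _
      rw [hcountl]
    · push_neg at hg
      rw [if_neg (by simpa using hg)]
      -- every element of the sorted list is < num
      have hallst : ∀ y ∈ L, y < num := by
        intro y hy
        have h1 : ¬ y = num := by
          intro h; subst h
          exact (List.count_pos_iff.mpr hy).ne' hc
        have h2 : ¬ num < y := by
          intro h
          have := List.countP_eq_zero.mp hg y hy
          simp [h] at this
        omega
      obtain ⟨y, t, hLc⟩ := List.exists_cons_of_ne_nil hstne
      have hlast : PySem.List.pyGet? L ((L.length : Int) - 1) = some ((y :: t).getLast (by simp)) := by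
        rw [hLc]
        have hlen : (((y :: t).length : Int)) - 1 = ((t.length : Nat) : Int) := by simp
        rw [hlen, PySem.List.pyGet?_natCast]
        simp only [List.getLast_eq_getElem, List.getElem?_eq_getElem (by simp : t.length < (y :: t).length)]
        rfl
      have hmem : (y :: t).getLast (by simp) ∈ L := by
        rw [hLc]; exact List.getLast_mem (by simp)
      show (if num > (PySem.List.pyGet? L ((L.length : Int) - 1)).getD 0 then ((L.length : Nat) : Int) else 0) = _
      rw [hlast]
      have hltnum : num > (some ((y :: t).getLast (by simp : (y :: t) ≠ []))).getD 0 := by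
        simpa using hallst _ hmem
      rw [if_pos hltnum]
      have hlenP : List.countP (fun x => decide (x < num)) L = L.length :=
        List.countP_eq_length.mpr (fun z hz => by simpa using hallst z hz)
      rw [← hcountl, hlenP, hperm.length_eq]

-- ===== VERDICT (by name: the statement is the Claim_ definition above) =====
theorem getRankOfNumber_spec : Claim_equal_getRankOfNumber := by
  intro stream num _ hpre
  exact pv_main stream num hpre
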